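-- pv_equiv track=rewrite | github.com/SeongHunTed/Algorithm | Algorithm/Programmers/Level2/42891.py | solution
-- ===== SOURCE A (Python) =====
-- import heapq
--
-- def solution(food_times, k):
--     if sum(food_times) <= k:
--         return -1
--
--     foodheap = []
--     length = len(food_times)
--
--     for i in range(length):
--         heapq.heappush(foodheap, [food_times[i], i+1])
--
--     time = 0
--     while (foodheap[0][0] - time) * length < k:
--         k -= (foodheap[0][0] - time) * length
--         time += (foodheap[0][0] - time)
--         length -= 1
--         heapq.heappop(foodheap)
--
--     result = sorted(foodheap, key=lambda x: x[1])
--     answer = result[k % length][1]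
--
--     return answer
-- ===== SOURCE B (Python) =====
-- def solution(food_times, k):
--     if sum(food_times) <= k:
--         return -1
--     remaining = [(i + 1, t) for i, t in enumerate(food_times)]
--     time = 0
--     while True:
--         m = min(t for _, t in remaining)
--         cost = (m - time) * len(remaining)
--         if cost < k:
--             k -= cost
--             time = m
--             remaining = [(i, t) for i, t in remaining if t != m]
--         else:
--             return remaining[k % len(remaining)][0]
-- ===== Notes on version B (the rewrite author's own statement) =====
-- stated objective: alternative
-- what changed: B simulates level by level instead of A's heap: it repeatedly takes the minimum remaining time, consumes (min - time) * count seconds in one arithmetic step, and filters the whole finished level out of the index-ordered pair list, so there is no heap, no one-at-a-time popping, and no final re-sort by index.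
import Mathlib
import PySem

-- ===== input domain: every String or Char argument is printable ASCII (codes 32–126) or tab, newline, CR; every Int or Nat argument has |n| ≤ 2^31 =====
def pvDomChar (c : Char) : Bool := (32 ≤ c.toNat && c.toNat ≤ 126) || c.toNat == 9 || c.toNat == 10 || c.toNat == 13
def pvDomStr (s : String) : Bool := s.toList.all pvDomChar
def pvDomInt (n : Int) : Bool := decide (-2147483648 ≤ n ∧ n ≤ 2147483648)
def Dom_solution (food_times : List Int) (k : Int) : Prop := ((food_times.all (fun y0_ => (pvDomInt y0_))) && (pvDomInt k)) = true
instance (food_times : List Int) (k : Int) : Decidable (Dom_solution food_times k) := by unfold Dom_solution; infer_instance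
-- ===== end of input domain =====

-- B replaces A's heap with its one-pop-at-a-time drain and final index sort by a level-by-level
-- simulation (consume the whole minimum time level at once, filter it out of the index-ordered
-- list); equal return value on all inputs where A returns.

-- ===== PORT A =====
-- heapq.heappush / heappop are library calls, ported by their min-priority-queue contract:
-- the heap is the lex-sorted list of its [time, index] entries (Python compares those lists
-- lexicographically). Exact here: pops observe only the minimum, and the final sorted() keys
-- on the pairwise-distinct indices, so the heap's internal array layout is unobservable.
def heapPush (h : List (Int × Int)) (x : Int × Int) : List (Int × Int) :=
  match h with
  | [] => [x]
  | y :: ys =>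
      if x.1 < y.1 ∨ (x.1 = y.1 ∧ x.2 < y.2) then x :: y :: ys else y :: heapPush ys x

-- the 'while (foodheap[0][0] - time) * length < k' loop; [] = Python's IndexError (outside Pre_)
def eatLoop : List (Int × Int) → Int → Int → Int → List (Int × Int) × Int × Int
  | [], _, length, k => ([], length, k)
  | (t, i) :: rest, time, length, k =>
      if (t - time) * length < k then
        eatLoop rest t (length - 1) (k - (t - time) * length)
      else ((t, i) :: rest, length, k)

def solution (food_times : List Int) (k : Int) : Int :=
  if food_times.sum ≤ k then -1
  else
    let foodheap := (PySem.List.enumerate food_times).foldl (fun h p => heapPush h (p.2, p.1 + 1)) []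
    let r := eatLoop foodheap 0 (food_times.length : Int) k
    let result := PySem.List.sorted r.1 (fun x => x.2) false
    (PySem.List.pyGetD result (PySem.Int.mod r.2.2 r.2.1) (0, 0)).2

-- ===== PORT B =====
-- Source B's 'while True' level loop over the (index, time) pairs still remaining, in index order;
-- Python's min(...) is PySem.List.min?; the none branch is Python's ValueError on an empty
-- sequence (unreachable inside Pre_, where the loop always stops before emptying the list).
def levelLoop (remaining : List (Int × Int)) (time k : Int) : Int :=
  match hm : PySem.List.min? (remaining.map (fun p => p.2)) (fun x => x) with
  | none => 0
  | some m =>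
      let cost := (m - time) * (remaining.length : Int)
      if cost < k then
        levelLoop (remaining.filter (fun p => decide (p.2 ≠ m))) m (k - cost)
      else
        (PySem.List.pyGetD remaining (PySem.Int.mod k (remaining.length : Int)) (0, 0)).1
termination_by remaining.length
decreasing_by
  rcases List.mem_map.mp (PySem.List.min?_mem hm) with ⟨p, hp, hpm⟩
  simp only [List.length_unattach]
  refine lt_of_lt_of_le
    (List.length_filter_lt_length_iff_exists.mpr ⟨⟨p, hp⟩, List.mem_attach _ _, ?_⟩) (by simp)
  simp [hpm]

def solution_alt (food_times : List Int) (k : Int) : Int :=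
  if food_times.sum ≤ k then -1
  else
    levelLoop ((PySem.List.enumerate food_times).map (fun p => (p.1 + 1, p.2))) 0 k

-- ===== PRECONDITION & SPEC =====
-- Pre_ excludes exactly the inputs where Python A raises: on an empty list with k < 0 the
-- guard 'sum(food_times) <= k' fails and 'foodheap[0]' raises IndexError (B raises there too).
def Pre_solution (food_times : List Int) (k : Int) : Prop := food_times ≠ [] ∨ 0 ≤ k
instance (food_times : List Int) (k : Int) : Decidable (Pre_solution food_times k) := by
  unfold Pre_solution; infer_instance

def pvWitness_solution : List Int × Int := ([3, 1, 2], 5)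

def Spec_solution (food_times : List Int) (k : Int) (out : Int) : Prop := out = solution_alt food_times k
instance (food_times : List Int) (k : Int) (out : Int) : Decidable (Spec_solution food_times k out) := by
  unfold Spec_solution; infer_instance

-- ===== CLAIM (what is proved, stated in full; the proofs are below) =====
def Claim_equal_solution : Prop := ∀ (food_times : List Int) (k : Int), Dom_solution food_times k → Pre_solution food_times k → Spec_solution food_times k (solution food_times k)

-- ===== LEMMAS AND PROOFS =====

-- membership in A's ordered heap insert
lemma mem_heapPush {y : Int × Int} {h : List (Int × Int)} {x : Int × Int} :
    y ∈ heapPush h x → y = x ∨ y ∈ h := by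
  induction h with
  | nil => simp [heapPush]
  | cons z zs ih =>
      simp only [heapPush]
      split_ifs
      · intro hy; simpa using hy
      · intro hy
        rcases List.mem_cons.mp hy with h1 | h2
        · exact Or.inr (by simp [h1])
        · rcases ih h2 with h3 | h4
          · exact Or.inl h3
          · exact Or.inr (by simp [h4])

lemma perm_heapPush (h : List (Int × Int)) (x : Int × Int) :
    (heapPush h x).Perm (x :: h) := by
  induction h with
  | nil => simp [heapPush]
  | cons z zs ih =>
      simp only [heapPush]
      split_ifs
      · exact List.Perm.refl _
      · exact (ih.cons z).trans (List.Perm.swap x z zs)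

lemma pairwise_heapPush {h : List (Int × Int)} (x : Int × Int)
    (hp : h.Pairwise (fun a b => a.1 ≤ b.1)) :
    (heapPush h x).Pairwise (fun a b => a.1 ≤ b.1) := by
  induction h with
  | nil => simp [heapPush]
  | cons z zs ih =>
      rcases List.pairwise_cons.mp hp with ⟨hz, hzs⟩
      simp only [heapPush]
      split_ifs with hc
      · refine List.pairwise_cons.mpr ⟨?_, hp⟩
        intro y hy
        have hx1 : x.1 ≤ z.1 := by rcases hc with h1 | h2 <;> omega
        rcases List.mem_cons.mp hy with h1 | h2
        · subst h1; omega
        · have := hz y h2; omega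
      · refine List.pairwise_cons.mpr ⟨?_, ih hzs⟩
        intro y hy
        rcases mem_heapPush hy with h1 | h2
        · subst h1
          have hz1 : z.1 ≤ y.1 := by
            by_contra h
            exact hc (Or.inl (by omega))
          omega
        · exact hz y h2

lemma perm_heapFold (P : List (Int × Int)) :
    ∀ acc : List (Int × Int), (P.foldl (fun h q => heapPush h q) acc).Perm (acc ++ P) := by
  induction P with
  | nil => intro acc; simp
  | cons q Ps ih =>
      intro acc
      have h1 := ih (heapPush acc q)
      have h2 : (heapPush acc q ++ Ps).Perm (acc ++ q :: Ps) := by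
        refine List.Perm.trans (List.Perm.append_right Ps (perm_heapPush acc q)) ?_
        exact (List.perm_middle).symm
      exact (List.foldl_cons .. ▸ h1).trans h2

lemma pairwise_heapFold (P : List (Int × Int)) :
    ∀ acc : List (Int × Int), acc.Pairwise (fun a b => a.1 ≤ b.1) →
      (P.foldl (fun h q => heapPush h q) acc).Pairwise (fun a b => a.1 ≤ b.1) := by
  induction P with
  | nil => intro acc h; simpa using h
  | cons q Ps ih => intro acc h; exact ih _ (pairwise_heapPush q h)

-- after the first pop of a level, the remaining equal-time entries are drained for free
lemma eatLoop_drain (t0 : Int) :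
    ∀ (S : List (Int × Int)) (k : Int), S.Pairwise (fun a b => a.1 ≤ b.1) →
      (∀ p ∈ S, t0 ≤ p.1) → 0 < k →
      eatLoop S t0 (S.length : Int) k
        = eatLoop (S.filter (fun p => decide (p.1 ≠ t0))) t0
            ((S.filter (fun p => decide (p.1 ≠ t0))).length : Int) k := by
  intro S
  induction S with
  | nil => intro k _ _ _; simp
  | cons p tl ih =>
      intro k hp hge hk
      rcases List.pairwise_cons.mp hp with ⟨hhead, htl⟩
      rcases p with ⟨t, i⟩
      by_cases ht : t = t0
      · subst ht
        rw [List.filter_cons_of_neg (by simp)]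
        have hstep : eatLoop ((t, i) :: tl) t (((t, i) :: tl).length : Int) k
            = eatLoop tl t ((tl.length : Int)) k := by
          simp only [eatLoop, List.length_cons, sub_self, zero_mul]
          rw [if_pos hk]
          have h1 : ((tl.length + 1 : Nat) : Int) - 1 = (tl.length : Int) := by push_cast; ring
          have h2 : k - 0 = k := by ring
          rw [h1, h2]
        rw [hstep]
        exact ih k htl (fun q hq => hge q (by simp [hq])) hk
      · have hgt : ∀ q ∈ tl, t0 < q.1 := by
          intro q hq
          have h1 := hhead q hq
          have h2 := hge (t, i) (by simp)
          simp only at h1 h2 ⊢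
          omega
        have hfil : tl.filter (fun p => decide (p.1 ≠ t0)) = tl := by
          apply List.filter_eq_self.mpr
          intro q hq
          have := hgt q hq
          simp only [decide_eq_true_eq]
          omega
        rw [List.filter_cons_of_pos (by simp [ht]), hfil]

-- the value of Python's min over B's remaining times, read off A's sorted remaining list
lemma min_eq_head (E : List (Int × Int)) (t0 i0 : Int) (rest : List (Int × Int))
    (hp : ((t0, i0) :: rest).Pairwise (fun a b => a.1 ≤ b.1))
    (hperm : (E.map (fun p => (p.2, p.1))).Perm ((t0, i0) :: rest)) :
    PySem.List.min? (E.map (fun p => p.2)) (fun x => x) = some t0 := by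
  have hpm : (E.map (fun p => p.2)).Perm (((t0, i0) :: rest).map (fun p => p.1)) := by
    have := hperm.map (fun p => p.1)
    simpa [List.map_map, Function.comp] using this
  have hne : E.map (fun p => p.2) ≠ [] := by
    intro h
    have := hpm.length_eq
    simp [h] at this
  rcases hmo : PySem.List.min? (E.map (fun p => p.2)) (fun x => x) with _ | m
  · exact absurd ((PySem.List.min?_eq_none_iff _ _).mp hmo) hne
  · have hmem : m ∈ ((t0, i0) :: rest).map (fun p => p.1) := hpm.mem_iff.mp (PySem.List.min?_mem hmo)
    have ht0mem : t0 ∈ E.map (fun p => p.2) := hpm.mem_iff.mpr (by simp)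
    have hle : m ≤ t0 := PySem.List.min?_isMin hmo t0 ht0mem
    have hge : t0 ≤ m := by
      simp only [List.map_cons, List.mem_cons] at hmem
      rcases hmem with h1 | h2
      · omega
      · rcases List.mem_map.mp h2 with ⟨q, hq, hqm⟩
        have h3 : t0 ≤ q.1 := by simpa using (List.pairwise_cons.mp hp).1 q hq
        omega
    rw [hmo, le_antisymm hle hge]

-- fst-sum after removing a whole time level
lemma sum_fst_filter (t0 : Int) (S : List (Int × Int)) :
    ((S.filter (fun p => decide (p.1 ≠ t0))).map (fun p => p.1)).sum
      = (S.map (fun p => p.1)).sum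
        - t0 * ((S.length : Int) - ((S.filter (fun p => decide (p.1 ≠ t0))).length : Int)) := by
  induction S with
  | nil => simp
  | cons p tl ih =>
      by_cases ht : p.1 = t0
      · rw [List.filter_cons_of_neg (by simp [ht])]
        simp only [List.map_cons, List.sum_cons, List.length_cons, ht]
        rw [ih]; push_cast; ring
      · rw [List.filter_cons_of_pos (by simp [ht])]
        simp only [List.map_cons, List.sum_cons, List.length_cons]
        rw [ih]; push_cast; ring

-- the main bridge: A's pop loop + final index sort equals B's level loop
lemma bridge : ∀ (n : Nat) (S E : List (Int × Int)) (time k : Int),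
    S.length ≤ n →
    S.Pairwise (fun a b => a.1 ≤ b.1) →
    (E.map (fun p => (p.2, p.1))).Perm S →
    E.Pairwise (fun p q => p.1 < q.1) →
    k + time * (S.length : Int) < (S.map (fun p => p.1)).sum →
    S ≠ [] →
    (PySem.List.pyGetD
        (PySem.List.sorted (eatLoop S time (S.length : Int) k).1 (fun x => x.2) false)
        (PySem.Int.mod (eatLoop S time (S.length : Int) k).2.2
          (eatLoop S time (S.length : Int) k).2.1) (0, 0)).2
      = levelLoop E time k := by
  intro n
  induction n with
  | zero =>
      intro S E time k hn _ _ _ _ hne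
      exact absurd (List.length_eq_zero_iff.mp (by omega)) hne
  | succ n ih =>
      intro S E time k hn hpair hperm hE hsum hne
      rcases S with _ | ⟨⟨t0, i0⟩, rest⟩
      · exact absurd rfl hne
      have hmin := min_eq_head E t0 i0 rest hpair hperm
      have hlenE : (E.length : Int) = (((t0, i0) :: rest).length : Int) := by
        have := hperm.length_eq; simp at this; exact_mod_cast (by simpa using this)
      rw [levelLoop.eq_def, hmin]
      dsimp only
      by_cases hc : (t0 - time) * ((((t0, i0) :: rest).length : Nat) : Int) < k
      · rw [if_pos (by rw [hlenE]; exact hc)]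
        -- A pops the head, then drains the rest of the level (cost 0 each) in one go
        have hstep : eatLoop ((t0, i0) :: rest) time (((t0, i0) :: rest).length : Int) k
            = eatLoop (rest.filter (fun p => decide (p.1 ≠ t0))) t0
                ((rest.filter (fun p => decide (p.1 ≠ t0))).length : Int)
                (k - (t0 - time) * (((t0, i0) :: rest).length : Int)) := by
          simp only [eatLoop, List.length_cons]
          rw [if_pos (by simp only [List.length_cons] at hc ⊢; push_cast at hc ⊢; linarith)]
          have harith : (((rest.length + 1 : Nat)) : Int) - 1 = (rest.length : Int) := by
            push_cast; ring
          rw [harith]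
          exact eatLoop_drain t0 rest _ (List.pairwise_cons.mp hpair).2
            (fun q hq => (List.pairwise_cons.mp hpair).1 q hq)
            (by simp only [List.length_cons] at hc ⊢; push_cast at hc ⊢; linarith)
        rw [hstep, hlenE]
        -- invariants for the smaller state
        set S' := rest.filter (fun p => decide (p.1 ≠ t0)) with hS'
        set E' := E.filter (fun p => decide (p.2 ≠ t0)) with hE'
        set k' := k - (t0 - time) * (((t0, i0) :: rest).length : Int) with hk'
        have hkpos : 0 < k' := by rw [hk']; simp only [List.length_cons] at hc ⊢; push_cast at hc ⊢; linarith
        have hSfil : ((t0, i0) :: rest).filter (fun p => decide (p.1 ≠ t0)) = S' := by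
          rw [hS', List.filter_cons_of_neg (by simp)]
        have hperm' : (E'.map (fun p => (p.2, p.1))).Perm S' := by
          have h1 : (E'.map (fun p => (p.2, p.1)))
              = (E.map (fun p => (p.2, p.1))).filter (fun q => decide (q.1 ≠ t0)) := by
            rw [hE', List.filter_map]
            rfl
          rw [h1, ← hSfil]
          exact hperm.filter _
        have hsum' : k' + t0 * (S'.length : Int) < (S'.map (fun p => p.1)).sum := by
          have h1 := sum_fst_filter t0 ((t0, i0) :: rest)
          rw [hSfil] at h1
          rw [h1, hk']
          simp only [List.length_cons] at hsum ⊢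
          push_cast at hsum ⊢
          linarith
        have hne' : S' ≠ [] := by
          intro h
          rw [h] at hsum'
          simp at hsum'
          omega
        have hlen' : S'.length ≤ n := by
          have h1 : S'.length ≤ rest.length := List.length_filter_le _ _
          simp at hn
          omega
        exact ih S' E' t0 k' hlen' ((List.pairwise_cons.mp hpair).2.filter _)
          hperm' (List.Pairwise.sublist List.filter_sublist hE) hsum' hne'
      · rw [if_neg (by rw [hlenE]; exact hc)]
        -- the loop stops immediately: A re-sorts by index, B indexes its list as it stands
        have hstop : eatLoop ((t0, i0) :: rest) time (((t0, i0) :: rest).length : Int) k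
            = ((t0, i0) :: rest, (((t0, i0) :: rest).length : Int), k) := by
          simp only [eatLoop, List.length_cons]
          rw [if_neg (by simp only [List.length_cons] at hc ⊢; push_cast at hc ⊢; linarith)]
        rw [hstop]
        have hsorted : PySem.List.sorted ((t0, i0) :: rest) (fun x => x.2) false
            = E.map (fun p => (p.2, p.1)) := by
          exact PySem.List.sorted_eq_of_perm_of_pairwise_lt _ _ _ hperm
            (List.pairwise_map.mpr (hE.imp (fun h => h)))
        rw [hsorted, ← hlenE]
        exact congrArg Prod.snd
          (PySem.List.pyGetD_map (fun p : Int × Int => (p.2, p.1)) E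
            (PySem.Int.mod k (E.length : Int)) (0, 0))

lemma main_eq (food_times : List Int) (k : Int) (hpre : food_times ≠ [] ∨ 0 ≤ k) :
    solution food_times k = solution_alt food_times k := by
  unfold solution solution_alt
  by_cases hg : food_times.sum ≤ k
  · simp [hg]
  · simp only [if_neg hg]
    set P := (PySem.List.enumerate food_times).map (fun p => (p.2, p.1 + 1)) with hP
    set E := (PySem.List.enumerate food_times).map (fun p => (p.1 + 1, p.2)) with hE
    have hfold : (PySem.List.enumerate food_times).foldl (fun h p => heapPush h (p.2, p.1 + 1)) []
        = P.foldl (fun h q => heapPush h q) [] := (List.foldl_map ..).symm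
    set S := P.foldl (fun h q => heapPush h q) [] with hS
    have hpermSP : S.Perm P := by simpa using perm_heapFold P []
    have hEP : E.map (fun p => (p.2, p.1)) = P := by
      rw [hE, hP, List.map_map]
      rfl
    have hperm : (E.map (fun p => (p.2, p.1))).Perm S := by
      rw [hEP]; exact hpermSP.symm
    have hpair : S.Pairwise (fun a b => a.1 ≤ b.1) := pairwise_heapFold P [] (by simp)
    have hEpair : E.Pairwise (fun p q => p.1 < q.1) := by
      rw [hE]
      refine List.Pairwise.map _ ?_ (PySem.List.pairwise_lt_enumerate food_times 0)
      intro a b h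
      simpa using by omega
    have hsumS : (S.map (fun p => p.1)).sum = food_times.sum := by
      have h1 : (S.map (fun p => p.1)).Perm (P.map (fun p => p.1)) := hpermSP.map _
      rw [h1.sum_eq, hP, List.map_map]
      have : ((fun p : Int × Int => p.1) ∘ (fun p : Int × Int => (p.2, p.1 + 1)))
          = (fun p : Int × Int => p.2) := rfl
      rw [this, PySem.List.map_snd_enumerate]
    have hft : food_times ≠ [] := by
      rcases hpre with h | h
      · exact h
      · intro hnil; rw [hnil] at hg; simp at hg; omega
    have hlenS : S.length = food_times.length := by
      have h1 := hpermSP.length_eq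
      rw [hP] at h1
      simp [PySem.List.length_enumerate] at h1
      simpa using h1
    have hne : S ≠ [] := by
      intro h
      rw [h] at hlenS
      exact hft (List.length_eq_zero_iff.mp hlenS.symm)
    have hlen : (food_times.length : Int) = (S.length : Int) := by exact_mod_cast hlenS.symm
    rw [hfold, hlen]
    exact bridge S.length S E 0 k le_rfl hpair hperm hEpair (by rw [hsumS]; omega) hne

-- ===== VERDICT (by name: the statement is the Claim_ definition above) =====
theorem solution_spec : Claim_equal_solution := by
  intro food_times k _ hpre
  unfold Spec_solution
  exact main_eq food_times k hpre
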